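-- pv_equiv track=rewrite | github.com/veronica320/Zeroshot-Event-Extraction | source/preprocessing/process_ere.py | process_wrapped_text
-- ===== SOURCE A (Python) =====
-- def process_wrapped_text(text: str) -> str:
-- 	"""Handles wrapped text in some documents by replacing linebreaks between a
-- 	a pair of <p> and </p> tags with spaces.
--
-- 	Args:
-- 		text (str): text string to process.
--
-- 	Returns:
-- 		str: processed text string.
-- 	"""
-- 	segments = text.split('\n')
-- 	segments_new = []
-- 	in_p = False
-- 	for segment in segments:
-- 		if in_p:
-- 			if segment == '</P>':
-- 				segments_new.append(segment)
-- 				in_p = False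
-- 			else:
-- 				if segments_new[-1]:
-- 					segments_new[-1] += ' '
-- 				segments_new[-1] += segment
-- 		else:
-- 			segments_new.append(segment)
-- 			if segment == '<P>':
-- 				segments_new.append('')
-- 				in_p = True
-- 	return '\n'.join(segments_new)
-- ===== SOURCE B (Python) =====
-- def process_wrapped_text(text: str) -> str:
--     """Look-ahead re-implementation: for each '<P>' line, scan forward to the
--     matching '</P>' (or end of input), join the block's content lines (after
--     dropping leading empty lines) with spaces in one batch, and resume after
--     the closing tag."""
--     lines = text.split('\n')
--     out = []
--     i = 0
--     n = len(lines)
--     while i < n: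
--         line = lines[i]
--         if line == '<P>':
--             j = i + 1
--             while j < n and lines[j] != '</P>':
--                 j += 1
--             content = lines[i + 1:j]
--             k = 0
--             while k < len(content) and content[k] == '':
--                 k += 1
--             out.append(line)
--             out.append(' '.join(content[k:]))
--             if j < n:
--                 out.append('</P>')
--             i = j + 1
--         else:
--             out.append(line)
--             i += 1
--     return '\n'.join(out)
-- ===== Notes on version B (the rewrite author's own statement) =====
-- stated objective: alternative
-- what changed: Replaces the boolean-flag state machine that mutates the last output entry line by line with a look-ahead decomposition: on '<P>' scan forward to the matching '</P>', batch-join the block's content (minus leading empty lines) with a single ' '.join, and resume after the tag.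
import Mathlib
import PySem

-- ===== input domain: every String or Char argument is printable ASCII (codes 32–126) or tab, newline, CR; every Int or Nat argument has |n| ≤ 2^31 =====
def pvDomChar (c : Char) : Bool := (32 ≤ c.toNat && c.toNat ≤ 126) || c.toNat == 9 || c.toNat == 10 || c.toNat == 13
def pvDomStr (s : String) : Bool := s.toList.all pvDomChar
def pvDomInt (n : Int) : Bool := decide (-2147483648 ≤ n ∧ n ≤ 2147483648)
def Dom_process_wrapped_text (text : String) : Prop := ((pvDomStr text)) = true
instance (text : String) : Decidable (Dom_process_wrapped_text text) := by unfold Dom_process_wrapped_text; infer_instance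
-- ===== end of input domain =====

-- B replaces A's boolean-flag state machine (which mutates the last output line) by a
-- look-ahead decomposition: find the matching '</P>', batch-join the block with ' '.join.
-- Proved: identical return values on every input (both are total).

-- ===== PORT A =====
-- segments_new[-1] += … : rewrite the last element of the list (unreachable on [] — inside
-- a <P> block the list is never empty, since '' was appended when the block opened)
def pvLastAppend : List String → (String → String) → List String
  | [], _ => []
  | [x], f => [f x]
  | x :: y :: xs, f => x :: pvLastAppend (y :: xs) f

-- the two mutation statements: "if segments_new[-1]: += ' '" then "+= segment"
def pvJoinF (last segment : String) : String :=
  (if last == "" then last else last ++ " ") ++ segment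

-- one iteration of A's for-loop; state = (segments_new, in_p)
def pvStepA (st : List String × Bool) (segment : String) : List String × Bool :=
  if st.2 then
    if segment == "</P>" then (st.1 ++ [segment], false)
    else (pvLastAppend st.1 (fun last => pvJoinF last segment), st.2)
  else
    if segment == "<P>" then ((st.1 ++ [segment]) ++ [""], true)
    else (st.1 ++ [segment], st.2)

def process_wrapped_text (text : String) : String :=
  -- text.split('\n'): sep ≠ "" so split? is always `some`
  PySem.Str.join "\n" (((PySem.Str.split? text "\n").getD []).foldl pvStepA ([], false)).1

-- ===== PORT B =====
-- look-ahead loop of Source B: lines[j] scan → takeWhile, lines[i+1:j] → the same prefix,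
-- the k-loop stripping leading '' → dropWhile, resume at i = j+1 → (drop …).tail
def pvGoB : List String → List String
  | [] => []
  | line :: rest =>
    if line == "<P>" then
      let content := rest.takeWhile (fun s => !(s == "</P>"))
      let joined := PySem.Str.join " " (content.dropWhile (fun s => s == ""))
      let r := rest.drop content.length
      if r.isEmpty then [line, joined]
      else line :: joined :: "</P>" :: pvGoB r.tail
    else line :: pvGoB rest
termination_by l => l.length
decreasing_by
  · simp only [List.length_cons, List.length_tail, List.length_drop]
    omega
  · simp

def process_wrapped_text_alt (text : String) : String :=
  PySem.Str.join "\n" (pvGoB ((PySem.Str.split? text "\n").getD []))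

-- ===== PRECONDITION & SPEC =====
def Spec_process_wrapped_text (text : String) (out : String) : Prop := out = process_wrapped_text_alt text
instance (text : String) (out : String) : Decidable (Spec_process_wrapped_text text out) := by unfold Spec_process_wrapped_text; infer_instance

-- ===== CLAIM (what is proved, stated in full; the proofs are below) =====
def Claim_equal_process_wrapped_text : Prop := ∀ (text : String), Dom_process_wrapped_text text → Spec_process_wrapped_text text (process_wrapped_text text)

-- ===== LEMMAS AND PROOFS =====

theorem pvLastAppend_append (out : List String) (s : String) (f : String → String) :
    pvLastAppend (out ++ [s]) f = out ++ [f s] := by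
  induction out with
  | nil => rfl
  | cons a out' ih =>
    cases out' with
    | nil => rfl
    | cons b t => simpa [pvLastAppend] using ih

theorem pvJoinF_foldl_ne (c : List String) : ∀ (s : String), s ≠ "" →
    List.foldl pvJoinF s c = PySem.Str.join " " (s :: c) := by
  induction c with
  | nil =>
    intro s _
    apply String.toList_inj.mp
    simp [PySem.Str.toList_join, PySem.Chars.join_singleton]
  | cons b t ih =>
    intro s hs
    have hbeq : (s == "") = false := by simpa using hs
    have hstep : pvJoinF s b = (s ++ " ") ++ b := by simp [pvJoinF, hbeq]
    have hne : (s ++ " ") ++ b ≠ "" := by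
      intro h
      have := congrArg String.toList h
      simp [String.toList_append] at this
    calc List.foldl pvJoinF s (b :: t)
        = List.foldl pvJoinF ((s ++ " ") ++ b) t := by simp [List.foldl, hstep]
      _ = PySem.Str.join " " (((s ++ " ") ++ b) :: t) := ih _ hne
      _ = PySem.Str.join " " (s :: b :: t) := by
          apply String.toList_inj.mp
          cases t with
          | nil =>
            simp [PySem.Str.toList_join, PySem.Chars.join_singleton,
              PySem.Chars.join_cons_cons, String.toList_append]
          | cons c t' =>
            simp [PySem.Str.toList_join, PySem.Chars.join_cons_cons,
              String.toList_append]

theorem pvJoinF_foldl_zero (c : List String) :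
    List.foldl pvJoinF "" c
      = PySem.Str.join " " (c.dropWhile (fun s => s == "")) := by
  induction c with
  | nil =>
    apply String.toList_inj.mp
    simp [PySem.Str.toList_join, PySem.Chars.join_nil]
  | cons b t ih =>
    by_cases hb : b = ""
    · subst hb
      simpa [List.foldl, pvJoinF] using ih
    · have hbeq : (b == "") = false := by simpa using hb
      have h0 : pvJoinF "" b = b := by simp [pvJoinF]
      simp only [List.foldl, h0, List.dropWhile, hbeq]
      exact pvJoinF_foldl_ne t b hb

-- inside a <P> block A folds the content into the last entry; characterised by
-- takeWhile/drop on the remaining lines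
theorem pvFoldA_inP (ls : List String) : ∀ (out : List String) (s : String),
    List.foldl pvStepA (out ++ [s], true) ls =
      (match ls.drop (ls.takeWhile (fun x => !(x == "</P>"))).length with
       | [] => (out ++ [List.foldl pvJoinF s (ls.takeWhile (fun x => !(x == "</P>")))], true)
       | _ :: tail =>
           List.foldl pvStepA
             (out ++ [List.foldl pvJoinF s (ls.takeWhile (fun x => !(x == "</P>"))), "</P>"],
              false) tail) := by
  induction ls with
  | nil => intro out s; rfl
  | cons x ls' ih =>
    intro out s
    by_cases hx : x = "</P>"
    · subst hx
      simp [List.foldl, pvStepA, List.takeWhile]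
    · have hxb : (x == "</P>") = false := by simpa using hx
      have hstep : pvStepA (out ++ [s], true) x = (out ++ [pvJoinF s x], true) := by
        simp [pvStepA, hxb, pvLastAppend_append]
      simp only [List.foldl, hstep, List.takeWhile, hxb, Bool.not_false, List.length_cons,
        List.drop_succ_cons]
      exact ih out (pvJoinF s x)

theorem pvFoldA_eq_pvGoB : ∀ (ls out : List String),
    (List.foldl pvStepA (out, false) ls).1 = out ++ pvGoB ls
  | [], out => by simp [pvGoB]
  | line :: rest, out => by
    by_cases hl : line = "<P>"
    · subst hl
      have hstep : pvStepA (out, false) "<P>" = ((out ++ ["<P>"]) ++ [""], true) := by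
        simp [pvStepA]
      rw [List.foldl_cons, hstep, pvFoldA_inP rest (out ++ ["<P>"]) ""]
      rcases hdrop : rest.drop (rest.takeWhile (fun x => !(x == "</P>"))).length
        with _ | ⟨x, tail⟩
      · simp only []
        rw [pvGoB]
        simp [hdrop, pvJoinF_foldl_zero]
      · simp only []
        rw [pvFoldA_eq_pvGoB tail]
        rw [pvGoB]
        simp [hdrop, pvJoinF_foldl_zero]
    · have hlb : (line == "<P>") = false := by simpa using hl
      have hstep : pvStepA (out, false) line = (out ++ [line], false) := by
        by_cases h2 : line = "</P>" <;> simp [pvStepA, hlb, h2]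
      rw [List.foldl_cons, hstep, pvFoldA_eq_pvGoB rest (out ++ [line])]
      rw [pvGoB]
      simp [hlb]
termination_by ls _ => ls.length
decreasing_by
  · have h1 : tail.length + 1
        = rest.length - (rest.takeWhile (fun x => !(x == "</P>"))).length := by
      have := congrArg List.length hdrop
      simpa [List.length_drop] using this.symm
    simp only [List.length_cons]
    omega
  · simp

-- ===== VERDICT (by name: the statement is the Claim_ definition above) =====
theorem process_wrapped_text_spec : Claim_equal_process_wrapped_text := by
  intro text _
  unfold Spec_process_wrapped_text process_wrapped_text process_wrapped_text_alt
  rw [pvFoldA_eq_pvGoB ((PySem.Str.split? text "\n").getD []) []]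
  simp
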